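-- pv_equiv track=rewrite | github.com/Zachanardo/Intellicrack | tests/unit/core/analysis/test_radare2_scripting.py | optimize_script
-- ===== SOURCE A (Python) =====
-- def optimize_script(script_content: str) -> str:
--     """Optimize radare2 script for performance."""
--     lines = script_content.split('\n')
--     optimized_lines = []
--
--     # Remove redundant analysis calls
--     analysis_done = False
--     for line in lines:
--         if 'aaa' in line and not analysis_done:
--             optimized_lines.append(line)
--             analysis_done = True
--         elif 'aaa' in line and analysis_done:
--             continue  # Skip redundant analysis
--         else:
--             optimized_lines.append(line)
--
--     # Combine consecutive seeks
--     final_lines = []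
--     last_seek = None
--     for line in optimized_lines:
--         if line.strip().startswith('r2.cmd("s ') or line.strip().startswith("r2.cmd('s "):
--             last_seek = line
--         else:
--             if last_seek:
--                 final_lines.append(last_seek)
--                 last_seek = None
--             final_lines.append(line)
--
--     if last_seek:
--         final_lines.append(last_seek)
--
--     return '\n'.join(final_lines)
-- ===== SOURCE B (Python) =====
-- def optimize_script(script_content: str) -> str:
--     """Single fused pass: dedup 'aaa' lines and defer seeks with one state machine."""
--     out = []
--     analysis_done = False
--     last_seek = None
--     for line in script_content.split('\n'):
--         if 'aaa' in line and analysis_done: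
--             continue  # redundant analysis
--         analysis_done = analysis_done or 'aaa' in line
--         stripped = line.strip()
--         if stripped.startswith('r2.cmd("s ') or stripped.startswith("r2.cmd('s "):
--             last_seek = line
--         else:
--             if last_seek is not None:
--                 out.append(last_seek)
--                 last_seek = None
--             out.append(line)
--     if last_seek is not None:
--         out.append(last_seek)
--     return '\n'.join(out)
-- ===== Notes on version B (the rewrite author's own statement) =====
-- stated objective: simpler
-- what changed: A's two sequential passes (aaa-dedup building an intermediate list, then a second loop deferring seek lines) are fused into one pass whose state machine maintains analysis_done and the pending last_seek together, with no intermediate list.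
import Mathlib
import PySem

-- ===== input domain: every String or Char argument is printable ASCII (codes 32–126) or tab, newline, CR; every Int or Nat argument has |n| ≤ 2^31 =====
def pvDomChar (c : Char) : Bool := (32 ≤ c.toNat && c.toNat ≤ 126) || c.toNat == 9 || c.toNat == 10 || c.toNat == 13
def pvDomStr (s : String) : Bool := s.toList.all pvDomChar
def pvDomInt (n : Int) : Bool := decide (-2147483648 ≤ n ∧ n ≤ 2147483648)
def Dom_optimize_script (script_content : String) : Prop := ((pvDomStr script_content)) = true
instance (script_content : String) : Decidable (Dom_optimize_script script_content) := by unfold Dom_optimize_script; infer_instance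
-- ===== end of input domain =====

-- B fuses A's two sequential passes into one state machine over the lines (objective: simpler, one pass, no intermediate list).
-- Note: Python's `if last_seek:` is ported as an Option match (isSome); last_seek is only ever set to a line whose
-- strip() starts with the nonempty prefix 'r2.cmd("s ' or "r2.cmd('s ", so it is never the empty string and truthiness = isSome.

-- ===== PORT A =====
-- first loop of A: drop every 'aaa' line after the first
def pvStepA1 (st : List String × Bool) (line : String) : List String × Bool :=
  if PySem.Str.isIn "aaa" line && !st.2 then (st.1 ++ [line], true)
  else if PySem.Str.isIn "aaa" line && st.2 then st
  else (st.1 ++ [line], st.2)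

-- second loop of A: defer a seek line into last_seek, flush it before a non-seek line
def pvStepA2 (st : List String × Option String) (line : String) : List String × Option String :=
  if PySem.Str.startswith (PySem.Str.strip line) "r2.cmd(\"s " ||
     PySem.Str.startswith (PySem.Str.strip line) "r2.cmd('s " then
    (st.1, some line)
  else
    match st.2 with
    | some sk => (st.1 ++ [sk] ++ [line], none)
    | none => (st.1 ++ [line], none)

def optimize_script (script_content : String) : String :=
  let lines := (PySem.Str.split? script_content "\n").getD []
  let p1 := lines.foldl pvStepA1 ([], false)
  let p2 := p1.1.foldl pvStepA2 ([], none)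
  let final_lines := match p2.2 with
    | some sk => p2.1 ++ [sk]
    | none => p2.1
  PySem.Str.join "\n" final_lines

-- ===== PORT B =====
-- B's single loop body: state = (output so far, analysis_done, pending last_seek)
def pvStepB (st : List String × Bool × Option String) (line : String) : List String × Bool × Option String :=
  if PySem.Str.isIn "aaa" line && st.2.1 then st
  else
    let done := st.2.1 || PySem.Str.isIn "aaa" line
    if PySem.Str.startswith (PySem.Str.strip line) "r2.cmd(\"s " ||
       PySem.Str.startswith (PySem.Str.strip line) "r2.cmd('s " then
      (st.1, done, some line)
    else
      match st.2.2 with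
      | some sk => (st.1 ++ [sk, line], done, none)
      | none => (st.1 ++ [line], done, none)

def optimize_script_alt (script_content : String) : String :=
  let r := ((PySem.Str.split? script_content "\n").getD []).foldl pvStepB ([], false, none)
  PySem.Str.join "\n" (match r.2.2 with
    | some sk => r.1 ++ [sk]
    | none => r.1)

-- ===== PRECONDITION & SPEC =====
def Spec_optimize_script (script_content : String) (out : String) : Prop := out = optimize_script_alt script_content
instance (script_content : String) (out : String) : Decidable (Spec_optimize_script script_content out) := by unfold Spec_optimize_script; infer_instance

-- ===== CLAIM (what is proved, stated in full; the proofs are below) =====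
def Claim_equal_optimize_script : Prop := ∀ (script_content : String), Dom_optimize_script script_content → Spec_optimize_script script_content (optimize_script script_content)

-- ===== LEMMAS AND PROOFS =====

-- A's first loop over an accumulator = the loop from [] with the accumulator prepended
theorem pvStepA1_append (lines : List String) (opt : List String) (done : Bool) :
    lines.foldl pvStepA1 (opt, done) =
      (opt ++ (lines.foldl pvStepA1 ([], done)).1, (lines.foldl pvStepA1 ([], done)).2) := by
  induction lines generalizing opt done with
  | nil => simp
  | cons l rest ih =>
    simp only [List.foldl_cons]
    cases ha : PySem.Str.isIn "aaa" l with
    | true =>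
      cases done with
      | false =>
        have h1 : pvStepA1 (opt, false) l = (opt ++ [l], true) := by
          simp only [pvStepA1]; rw [ha]; simp
        have h2 : pvStepA1 (([] : List String), false) l = ([l], true) := by
          simp only [pvStepA1]; rw [ha]; simp
        rw [h1, h2, ih (opt ++ [l]) true, ih [l] true]
        simp
      | true =>
        have h1 : pvStepA1 (opt, true) l = (opt, true) := by
          simp only [pvStepA1]; rw [ha]; simp
        have h2 : pvStepA1 (([] : List String), true) l = ([], true) := by
          simp only [pvStepA1]; rw [ha]; simp
        rw [h1, h2]
        exact ih opt true
    | false =>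
      have h1 : pvStepA1 (opt, done) l = (opt ++ [l], done) := by
        simp only [pvStepA1]; rw [ha]; simp
      have h2 : pvStepA1 (([] : List String), done) l = ([l], done) := by
        simp only [pvStepA1]; rw [ha]; simp
      rw [h1, h2, ih (opt ++ [l]) done, ih [l] done]
      simp

-- Fusion: B's single loop computes A's two loops composed
theorem pvFuse (lines : List String) (fin : List String) (done : Bool) (ls : Option String) :
    lines.foldl pvStepB (fin, done, ls) =
      (((lines.foldl pvStepA1 ([], done)).1.foldl pvStepA2 (fin, ls)).1,
       (lines.foldl pvStepA1 ([], done)).2,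
       ((lines.foldl pvStepA1 ([], done)).1.foldl pvStepA2 (fin, ls)).2) := by
  induction lines generalizing fin done ls with
  | nil => simp
  | cons l rest ih =>
    simp only [List.foldl_cons]
    cases ha : PySem.Str.isIn "aaa" l with
    | true =>
      cases done with
      | true =>
        -- both versions skip the redundant analysis line
        have hb : pvStepB (fin, true, ls) l = (fin, true, ls) := by
          simp only [pvStepB]; rw [ha]; simp
        have h1 : pvStepA1 (([] : List String), true) l = ([], true) := by
          simp only [pvStepA1]; rw [ha]; simp
        rw [hb, h1]
        exact ih fin true ls
      | false =>
        -- the line is kept and analysis_done becomes true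
        have h1 : pvStepA1 (([] : List String), false) l = ([l], true) := by
          simp only [pvStepA1]; rw [ha]; simp
        rw [h1, pvStepA1_append rest [l] true]
        simp only [List.cons_append, List.nil_append, List.foldl_cons]
        cases hs : (PySem.Str.startswith (PySem.Str.strip l) "r2.cmd(\"s " ||
            PySem.Str.startswith (PySem.Str.strip l) "r2.cmd('s ") with
        | true =>
          have hb : pvStepB (fin, false, ls) l = (fin, true, some l) := by
            simp only [pvStepB]; rw [ha, hs]; simp
          have h2 : pvStepA2 (fin, ls) l = (fin, some l) := by
            simp only [pvStepA2]; rw [hs]; simp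
          rw [hb, h2]
          exact ih fin true (some l)
        | false =>
          cases ls with
          | some sk =>
            have hb : pvStepB (fin, false, some sk) l = (fin ++ [sk, l], true, none) := by
              simp only [pvStepB]; rw [ha, hs]; simp
            have h2 : pvStepA2 (fin, some sk) l = (fin ++ [sk] ++ [l], none) := by
              simp only [pvStepA2]; rw [hs]; simp
            rw [hb, h2]
            simpa using ih (fin ++ [sk] ++ [l]) true none
          | none =>
            have hb : pvStepB (fin, false, none) l = (fin ++ [l], true, none) := by
              simp only [pvStepB]; rw [ha, hs]; simp
            have h2 : pvStepA2 (fin, none) l = (fin ++ [l], none) := by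
              simp only [pvStepA2]; rw [hs]; simp
            rw [hb, h2]
            exact ih (fin ++ [l]) true none
    | false =>
      -- no 'aaa' in the line: kept, analysis_done unchanged
      have h1 : pvStepA1 (([] : List String), done) l = ([l], done) := by
        simp only [pvStepA1]; rw [ha]; simp
      rw [h1, pvStepA1_append rest [l] done]
      simp only [List.cons_append, List.nil_append, List.foldl_cons]
      cases hs : (PySem.Str.startswith (PySem.Str.strip l) "r2.cmd(\"s " ||
          PySem.Str.startswith (PySem.Str.strip l) "r2.cmd('s ") with
      | true =>
        have hb : pvStepB (fin, done, ls) l = (fin, done, some l) := by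
          simp only [pvStepB]; rw [ha, hs]; simp
        have h2 : pvStepA2 (fin, ls) l = (fin, some l) := by
          simp only [pvStepA2]; rw [hs]; simp
        rw [hb, h2]
        exact ih fin done (some l)
      | false =>
        cases ls with
        | some sk =>
          have hb : pvStepB (fin, done, some sk) l = (fin ++ [sk, l], done, none) := by
            simp only [pvStepB]; rw [ha, hs]; simp
          have h2 : pvStepA2 (fin, some sk) l = (fin ++ [sk] ++ [l], none) := by
            simp only [pvStepA2]; rw [hs]; simp
          rw [hb, h2]
          simpa using ih (fin ++ [sk] ++ [l]) done none
        | none =>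
          have hb : pvStepB (fin, done, none) l = (fin ++ [l], done, none) := by
            simp only [pvStepB]; rw [ha, hs]; simp
          have h2 : pvStepA2 (fin, none) l = (fin ++ [l], none) := by
            simp only [pvStepA2]; rw [hs]; simp
          rw [hb, h2]
          exact ih (fin ++ [l]) done none

-- ===== VERDICT (by name: the statement is the Claim_ definition above) =====
theorem optimize_script_spec : Claim_equal_optimize_script := by
  intro s _
  unfold Spec_optimize_script optimize_script optimize_script_alt
  rw [pvFuse]
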